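-- pv_equiv track=rewrite | github.com/imyjimmy/investing-platform | src/investing_platform/services/filesystem_connectors.py | _is_snapshot_data_row
-- ===== SOURCE A (Python) =====
-- HEADER_ALIASES: dict[str, tuple[str, ...]] = {
--     "account_id": ("account number", "account #", "account", "account id"),
--     "account_name": ("account name", "registration", "account title", "account description"),
--     "symbol": ("symbol", "ticker", "ticker symbol", "security symbol"),
--     "name": ("description", "security description", "name", "security", "investment name"),
--     "quantity": ("quantity", "qty", "shares", "current quantity"),
--     "price": ("last price", "price", "current price", "mark price", "closing price"),
--     "value": ("current value", "market value", "value", "current market value", "ending value"),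
--     "cost_basis": ("cost basis total", "cost basis", "total cost basis", "book cost", "cost"),
--     "gain_loss": ("gain/loss dollar", "gain loss", "gain/loss", "total gain/loss dollar", "unrealized gain/loss"),
--     "currency": ("currency", "currency code", "iso currency"),
-- }
--
-- def _is_snapshot_data_row(row: dict[str, str]) -> bool:
--     normalized = _normalize_row(row)
--     return any(
--         item is not None and item != ""
--         for item in (
--             normalized.get("symbol"),
--             normalized.get("name"),
--             normalized.get("value"),
--             normalized.get("quantity"),
--             normalized.get("cost_basis"),
--         )
--     )
--
-- def _normalize_row(row: dict[str, str]) -> dict[str, str]: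
--     normalized_headers = {_normalize_header(key): value for key, value in row.items()}
--     resolved: dict[str, str] = {}
--     for target, aliases in HEADER_ALIASES.items():
--         for alias in aliases:
--             value = normalized_headers.get(_normalize_header(alias))
--             if value not in {None, ""}:
--                 resolved[target] = value
--                 break
--     return resolved
--
-- def _normalize_header(value: str) -> str:
--     cleaned = value.strip().lower()
--     return " ".join("".join(character if character.isalnum() else " " for character in cleaned).split())
-- ===== SOURCE B (Python) =====
-- HEADER_ALIASES: dict[str, tuple[str, ...]] = {
--     "account_id": ("account number", "account #", "account", "account id"),
--     "account_name": ("account name", "registration", "account title", "account description"),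
--     "symbol": ("symbol", "ticker", "ticker symbol", "security symbol"),
--     "name": ("description", "security description", "name", "security", "investment name"),
--     "quantity": ("quantity", "qty", "shares", "current quantity"),
--     "price": ("last price", "price", "current price", "mark price", "closing price"),
--     "value": ("current value", "market value", "value", "current market value", "ending value"),
--     "cost_basis": ("cost basis total", "cost basis", "total cost basis", "book cost", "cost"),
--     "gain_loss": ("gain/loss dollar", "gain loss", "gain/loss", "total gain/loss dollar", "unrealized gain/loss"),
--     "currency": ("currency", "currency code", "iso currency"),
-- }
--
--
-- def _normalize_header(value: str) -> str:
--     cleaned = value.strip().lower()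
--     return " ".join("".join(character if character.isalnum() else " " for character in cleaned).split())
--
--
-- _HOLDING_TARGETS = ("symbol", "name", "value", "quantity", "cost_basis")
--
-- _HOLDING_ALIAS_SET = frozenset(
--     _normalize_header(alias)
--     for target in _HOLDING_TARGETS
--     for alias in HEADER_ALIASES[target]
-- )
--
--
-- def _is_snapshot_data_row(row: dict[str, str]) -> bool:
--     normalized_headers = {_normalize_header(key): value for key, value in row.items()}
--     return any(
--         header in _HOLDING_ALIAS_SET and value != ""
--         for header, value in normalized_headers.items()
--     )
-- ===== Notes on version B (the rewrite author's own statement) =====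
-- stated objective: simpler
-- what changed: Replaces the per-target alias-resolution loop (building a resolved dict over all 10 targets, then probing 5 keys) with a precomputed frozenset of the normalized aliases of the 5 relevant targets and a single membership-filtered pass over the normalized row headers.
import Mathlib
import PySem

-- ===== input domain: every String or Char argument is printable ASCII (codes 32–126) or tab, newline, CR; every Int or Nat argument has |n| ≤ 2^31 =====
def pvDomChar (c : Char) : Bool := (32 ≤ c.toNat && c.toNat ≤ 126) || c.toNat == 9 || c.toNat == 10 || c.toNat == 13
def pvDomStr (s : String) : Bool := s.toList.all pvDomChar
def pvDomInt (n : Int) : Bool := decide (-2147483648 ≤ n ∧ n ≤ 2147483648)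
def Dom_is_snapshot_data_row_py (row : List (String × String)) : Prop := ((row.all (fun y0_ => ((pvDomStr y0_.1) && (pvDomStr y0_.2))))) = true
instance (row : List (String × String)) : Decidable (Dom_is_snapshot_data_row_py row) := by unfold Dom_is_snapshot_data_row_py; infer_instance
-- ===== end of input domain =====

-- B replaces A's 10-target alias-resolution loop by a precomputed set of the normalized
-- aliases of the 5 holding-relevant targets plus one membership-filtered pass over the
-- normalized headers (objective: simpler).

-- ===== PORT A =====

-- _normalize_header (shared helper of both Python files, character for character)
def normalizeHeader (value : String) : String :=
  let cleaned := PySem.Str.lower (PySem.Str.strip value)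
  PySem.Str.join " " (PySem.Str.split₀
    (PySem.Str.join "" (cleaned.toList.map
      (fun c => if PySem.Chars.isalnum c then String.ofList [c] else " "))))

-- HEADER_ALIASES, in source order
def headerAliases : List (String × List String) := [
  ("account_id", ["account number", "account #", "account", "account id"]),
  ("account_name", ["account name", "registration", "account title", "account description"]),
  ("symbol", ["symbol", "ticker", "ticker symbol", "security symbol"]),
  ("name", ["description", "security description", "name", "security", "investment name"]),
  ("quantity", ["quantity", "qty", "shares", "current quantity"]),
  ("price", ["last price", "price", "current price", "mark price", "closing price"]),
  ("value", ["current value", "market value", "value", "current market value", "ending value"]),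
  ("cost_basis", ["cost basis total", "cost basis", "total cost basis", "book cost", "cost"]),
  ("gain_loss", ["gain/loss dollar", "gain loss", "gain/loss", "total gain/loss dollar", "unrealized gain/loss"]),
  ("currency", ["currency", "currency code", "iso currency"])]

-- the inner 'for alias in aliases: … break' of _normalize_row
def resolveTarget (nh : PySem.Dict String String) (res : PySem.Dict String String)
    (target : String) : List String → PySem.Dict String String
  | [] => res
  | al :: rest =>
    match nh.get? (normalizeHeader al) with
    | some v => if v = "" then resolveTarget nh res target rest else res.insert target v
    | none => resolveTarget nh res target rest

-- 'item is not None and item != ""'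
def okOpt (o : Option String) : Bool :=
  match o with
  | some v => decide (v ≠ "")
  | none => false

def is_snapshot_data_row_py (row : List (String × String)) : Bool :=
  let normalizedHeaders : PySem.Dict String String :=
    row.foldl (fun d kv => d.insert (normalizeHeader kv.1) kv.2) PySem.Dict.empty
  let resolved : PySem.Dict String String :=
    headerAliases.foldl (fun res ta => resolveTarget normalizedHeaders res ta.1 ta.2) PySem.Dict.empty
  [resolved.get? "symbol", resolved.get? "name", resolved.get? "value",
   resolved.get? "quantity", resolved.get? "cost_basis"].any okOpt

-- ===== PORT B =====

-- the aliases of the 5 holding-relevant targets (Source B's generator over _HOLDING_TARGETS)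
def holdingAliases : List String :=
  ["symbol", "ticker", "ticker symbol", "security symbol",
   "description", "security description", "name", "security", "investment name",
   "current value", "market value", "value", "current market value", "ending value",
   "quantity", "qty", "shares", "current quantity",
   "cost basis total", "cost basis", "total cost basis", "book cost", "cost"]

-- _HOLDING_ALIAS_SET
def holdingAliasSet : PySem.Set String :=
  PySem.Set.ofList (holdingAliases.map normalizeHeader)

def is_snapshot_data_row_py_alt (row : List (String × String)) : Bool :=
  let normalizedHeaders : PySem.Dict String String :=
    row.foldl (fun d kv => d.insert (normalizeHeader kv.1) kv.2) PySem.Dict.empty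
  normalizedHeaders.items.any (fun p => holdingAliasSet.contains p.1 && decide (p.2 ≠ ""))

-- ===== PRECONDITION & SPEC =====
def Spec_is_snapshot_data_row_py (row : List (String × String)) (out : Bool) : Prop := out = is_snapshot_data_row_py_alt row
instance (row : List (String × String)) (out : Bool) : Decidable (Spec_is_snapshot_data_row_py row out) := by unfold Spec_is_snapshot_data_row_py; infer_instance

-- ===== CLAIM (what is proved, stated in full; the proofs are below) =====
def Claim_equal_is_snapshot_data_row_py : Prop := ∀ (row : List (String × String)), Dom_is_snapshot_data_row_py row → Spec_is_snapshot_data_row_py row (is_snapshot_data_row_py row)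

-- ===== LEMMAS AND PROOFS =====

-- a target other than t is untouched by t's alias scan
theorem resolveTarget_get?_of_ne (nh res : PySem.Dict String String) (t t' : String)
    (h : t' ≠ t) (as : List String) :
    (resolveTarget nh res t as).get? t' = res.get? t' := by
  induction as generalizing res with
  | nil => rfl
  | cons a rest ih =>
    simp only [resolveTarget]
    cases nh.get? (normalizeHeader a) with
    | none => exact ih res
    | some v =>
      by_cases hv : v = "" <;> simp [hv, ih, PySem.Dict.get?_insert_of_ne _ _ h]

-- t's entry after its own scan: res's previous entry or-ed with 'some alias hits'
theorem okOpt_resolveTarget_self (nh res : PySem.Dict String String) (t : String)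
    (as : List String) :
    okOpt ((resolveTarget nh res t as).get? t)
      = (okOpt (res.get? t) || as.any (fun a => okOpt (nh.get? (normalizeHeader a)))) := by
  induction as generalizing res with
  | nil => simp [resolveTarget]
  | cons a rest ih =>
    simp only [resolveTarget, List.any_cons]
    cases h : nh.get? (normalizeHeader a) with
    | none => rw [ih]; simp [okOpt]
    | some v =>
      by_cases hv : v = ""
      · rw [show (match some v with
            | some v => if v = "" then resolveTarget nh res t rest else res.insert t v
            | none => resolveTarget nh res t rest) = if v = "" then resolveTarget nh res t rest else res.insert t v from rfl,
          if_pos hv, ih]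
        simp [okOpt, hv]
      · rw [show (match some v with
            | some v => if v = "" then resolveTarget nh res t rest else res.insert t v
            | none => resolveTarget nh res t rest) = if v = "" then resolveTarget nh res t rest else res.insert t v from rfl,
          if_neg hv]
        simp [okOpt, hv, PySem.Dict.get?_insert_self]

-- lookups over a key list vs one filtered pass over the items, for a dict with unique keys
theorem any_get?_eq_items_any (d : PySem.Dict String String) (hnd : d.keys.Nodup)
    (L : List String) :
    L.any (fun k => okOpt (d.get? k))
      = d.items.any (fun p => decide (p.1 ∈ L) && decide (p.2 ≠ "")) := by
  rw [Bool.eq_iff_iff, List.any_eq_true, List.any_eq_true]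
  constructor
  · rintro ⟨k, hk, hok⟩
    cases hv : d.get? k with
    | none => simp [okOpt, hv] at hok
    | some v =>
      refine ⟨(k, v), PySem.Dict.mem_items_of_get?_eq_some _ hv, ?_⟩
      simp only [okOpt, hv] at hok
      simp [hk, of_decide_eq_true hok]
  · rintro ⟨⟨k, v⟩, hp, hcond⟩
    simp only [Bool.and_eq_true, decide_eq_true_eq] at hcond
    exact ⟨k, hcond.1, by simp [okOpt, PySem.Dict.get?_of_mem_items _ hp hnd, hcond.2]⟩

-- the whole resolution loop, seen through one target's lookup
theorem okOpt_resolved (nh : PySem.Dict String String) (t : String)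
    (L : List (String × List String)) (res : PySem.Dict String String) :
    okOpt ((L.foldl (fun r ta => resolveTarget nh r ta.1 ta.2) res).get? t)
      = (okOpt (res.get? t)
          || (L.flatMap (fun ta => if ta.1 = t then ta.2 else [])).any
               (fun a => okOpt (nh.get? (normalizeHeader a)))) := by
  induction L generalizing res with
  | nil => simp
  | cons ta L ih =>
    simp only [List.foldl_cons, List.flatMap_cons, List.any_append]
    rw [ih]
    by_cases h : ta.1 = t
    · subst h
      rw [okOpt_resolveTarget_self]
      simp [Bool.or_assoc]
    · rw [resolveTarget_get?_of_ne nh res ta.1 t (fun e => h e.symm)]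
      simp [h]

theorem contains_holdingAliasSet (y : String) :
    holdingAliasSet.contains y = decide (y ∈ holdingAliases.map normalizeHeader) := by
  simp [holdingAliasSet, PySem.Set.contains, PySem.Set.mem_ofList]

-- ===== VERDICT (by name: the statement is the Claim_ definition above) =====
theorem is_snapshot_data_row_py_spec : Claim_equal_is_snapshot_data_row_py := by
  intro row _
  unfold Spec_is_snapshot_data_row_py is_snapshot_data_row_py is_snapshot_data_row_py_alt
  set nh : PySem.Dict String String :=
    row.foldl (fun d kv => d.insert (normalizeHeader kv.1) kv.2) PySem.Dict.empty with hnh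
  have hnd : nh.keys.Nodup := by
    rw [hnh]
    exact PySem.Dict.nodup_keys_foldl_insert_key row (fun kv => normalizeHeader kv.1) _ _
      PySem.Dict.nodup_keys_empty
  -- reduce A's five lookups into the resolved dict to alias scans over nh,
  -- and B's filtered items pass to the same scans
  simp only [headerAliases, List.any_cons, List.any_nil, okOpt_resolved,
    PySem.Dict.get?_empty, contains_holdingAliasSet]
  rw [show (fun p : String × String => decide (p.1 ∈ holdingAliases.map normalizeHeader) && decide (p.2 ≠ ""))
        = (fun p : String × String => decide (p.1 ∈ List.map normalizeHeader holdingAliases) && decide (p.2 ≠ "")) from rfl,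
      ← any_get?_eq_items_any nh hnd (holdingAliases.map normalizeHeader), List.any_map]
  simp [okOpt, holdingAliases, Bool.or_assoc]
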